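-- pv_equiv track=rewrite | github.com/pypi-data/pypi-mirror-401 | packages/xython/xython-4.2.0.tar.gz/xython-4.2.0/src/xython/xy_util.py | mix_two_list_as_beside
-- ===== SOURCE A (Python) =====
-- def mix_two_list_as_beside(input_l2d_1, input_l2d_2):
-- 	"""
-- 	맨앞의 자료가 같다는 가정에서 하는것
-- 	제목부분은 고유한 자료여야 한다
-- 	자료가 없거나 값이 없을때 붙이는 빈자료를 위해 만든것
--
-- 	:param input_l2d_1:
-- 	:param input_l2d_2:
-- 	:return:
-- 	"""
-- 	no_of_l2d_1 = len(input_l2d_1[0]) - 1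
-- 	no_of_l2d_2 = len(input_l2d_2[0]) - 1
-- 	empty_l2d_1 = [""] * no_of_l2d_1
-- 	empty_l2d_2 = [""] * no_of_l2d_2
-- 	# 리스트형태로는 코드가 더 길어질것으로 보여서 입력자료를 사전으로 변경 한것
-- 	temp_dic = {}
-- 	for one in input_l2d_1:
-- 		temp_dic[one[0]] = one[1:]
-- 	checked_list = []
-- 	# 기준이 되는 자료에 항목이 있을때
-- 	for one in input_l2d_2:
-- 		if one[0] in temp_dic.keys():
-- 			temp_dic[one[0]] = list(temp_dic[one[0]]) + list(one[1:])
-- 		else: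
-- 			temp_dic[one[0]] = empty_l2d_1 + list(one[1:])
-- 		checked_list.append(one[0])
-- 	# 기준자료에 항목이 없는것에 대한것
-- 	for one in temp_dic.keys():
-- 		if not one in checked_list:
-- 			temp_dic[one] = list(temp_dic[one]) + empty_l2d_2
-- 	# 사전형식을 리스트로 다시 만드는것
-- 	result = []
-- 	for one in temp_dic:
-- 		result.append([one] + list(temp_dic[one]))
-- 	return result
-- ===== SOURCE B (Python) =====
-- def mix_two_list_as_beside(input_l2d_1, input_l2d_2):
--     empty1 = [""] * (len(input_l2d_1[0]) - 1)
--     empty2 = [""] * (len(input_l2d_2[0]) - 1)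
--     d1 = {}
--     for row in input_l2d_1:
--         d1[row[0]] = list(row[1:])
--     d2 = {}
--     for row in input_l2d_2:
--         d2[row[0]] = d2.get(row[0], []) + list(row[1:])
--     keys = list(d1) + [k for k in d2 if k not in d1]
--     return [[k] + d1.get(k, empty1) + d2.get(k, empty2) for k in keys]
-- ===== Notes on version B (the rewrite author's own statement) =====
-- stated objective: simpler
-- what changed: Instead of mutating one dict through three sequential passes with a checked-list, B builds the two sides independently (list1 keys overwrite, list2 keys concatenate) and emits [key] + d1.get(key, pad1) + d2.get(key, pad2) over d1's key order followed by d2-only keys.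
import Mathlib
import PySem

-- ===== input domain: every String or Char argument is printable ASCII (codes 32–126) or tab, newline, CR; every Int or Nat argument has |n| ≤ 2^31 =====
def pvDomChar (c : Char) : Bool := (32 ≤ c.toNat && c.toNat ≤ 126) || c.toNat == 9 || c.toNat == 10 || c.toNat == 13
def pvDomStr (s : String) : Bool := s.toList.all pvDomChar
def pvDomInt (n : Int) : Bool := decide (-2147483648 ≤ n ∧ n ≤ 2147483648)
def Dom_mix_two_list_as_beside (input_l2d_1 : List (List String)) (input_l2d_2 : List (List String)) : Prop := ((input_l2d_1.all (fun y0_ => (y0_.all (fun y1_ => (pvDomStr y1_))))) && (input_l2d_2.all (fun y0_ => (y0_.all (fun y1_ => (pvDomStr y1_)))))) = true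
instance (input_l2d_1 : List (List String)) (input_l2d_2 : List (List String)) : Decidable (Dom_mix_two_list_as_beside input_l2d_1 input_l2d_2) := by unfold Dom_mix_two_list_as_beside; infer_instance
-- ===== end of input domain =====

-- B builds the two sides as separate dicts (list1: overwrite; list2: concatenate) and emits
-- [key] + d1.get(key, pad1) + d2.get(key, pad2) over the merged key order — a different
-- decomposition of the merge (A mutates one dict in three passes with a checked-list).

-- ===== PORT A =====
-- one[0] / one[1:] are ported as headD "" / drop 1 (exact on the nonempty rows Pre_ admits);
-- temp_dic[k] on a key the branch guarantees present is ported as getD k [].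
def mix_two_list_as_beside (input_l2d_1 : List (List String)) (input_l2d_2 : List (List String)) : List (List String) :=
  let no_of_l2d_1 : Nat := (input_l2d_1.headD []).length - 1
  let no_of_l2d_2 : Nat := (input_l2d_2.headD []).length - 1
  let empty_l2d_1 : List String := List.replicate no_of_l2d_1 ""
  let empty_l2d_2 : List String := List.replicate no_of_l2d_2 ""
  let temp_dic : PySem.Dict String (List String) :=
    input_l2d_1.foldl (fun d one => d.insert (one.headD "") (one.drop 1)) PySem.Dict.empty
  let st :=
    input_l2d_2.foldl (fun (st : PySem.Dict String (List String) × List String) one =>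
      (if st.1.keys.contains (one.headD "") then
          st.1.insert (one.headD "") (st.1.getD (one.headD "") [] ++ one.drop 1)
        else
          st.1.insert (one.headD "") (empty_l2d_1 ++ one.drop 1),
       st.2 ++ [one.headD ""])) (temp_dic, ([] : List String))
  let temp_dic2 := st.1
  let checked_list := st.2
  let temp_dic3 :=
    temp_dic2.keys.foldl (fun d one =>
      if !(checked_list.contains one) then d.insert one (d.getD one [] ++ empty_l2d_2) else d)
      temp_dic2
  temp_dic3.items.foldl (fun result p => result ++ [p.1 :: p.2]) []

-- ===== PORT B =====
def mix_two_list_as_beside_alt (input_l2d_1 : List (List String)) (input_l2d_2 : List (List String)) : List (List String) :=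
  let empty1 : List String := List.replicate ((input_l2d_1.headD []).length - 1) ""
  let empty2 : List String := List.replicate ((input_l2d_2.headD []).length - 1) ""
  let d1 : PySem.Dict String (List String) :=
    input_l2d_1.foldl (fun d row => d.insert (row.headD "") (row.drop 1)) PySem.Dict.empty
  let d2 : PySem.Dict String (List String) :=
    input_l2d_2.foldl (fun d row => d.insert (row.headD "") (d.getD (row.headD "") [] ++ row.drop 1)) PySem.Dict.empty
  let keys := d1.keys ++ d2.keys.filter (fun k => !(d1.contains k))
  keys.map (fun k => k :: (d1.getD k empty1 ++ d2.getD k empty2))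

-- ===== PRECONDITION & SPEC =====
-- Pre_ excludes exactly the inputs where Python A raises IndexError: an empty outer list
-- (input[0]) or an empty row (one[0]). B raises there too.
def Pre_mix_two_list_as_beside (input_l2d_1 : List (List String)) (input_l2d_2 : List (List String)) : Prop :=
  input_l2d_1 ≠ [] ∧ input_l2d_2 ≠ [] ∧ (∀ r ∈ input_l2d_1, r ≠ []) ∧ (∀ r ∈ input_l2d_2, r ≠ [])
instance (input_l2d_1 : List (List String)) (input_l2d_2 : List (List String)) : Decidable (Pre_mix_two_list_as_beside input_l2d_1 input_l2d_2) := by unfold Pre_mix_two_list_as_beside; infer_instance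
def pvWitness_mix_two_list_as_beside : List (List String) × List (List String) :=
  ([["a", "1"], ["b", "2"]], [["b", "x"], ["c", "y"]])
def Spec_mix_two_list_as_beside (input_l2d_1 : List (List String)) (input_l2d_2 : List (List String)) (out : List (List String)) : Prop := out = mix_two_list_as_beside_alt input_l2d_1 input_l2d_2
instance (input_l2d_1 : List (List String)) (input_l2d_2 : List (List String)) (out : List (List String)) : Decidable (Spec_mix_two_list_as_beside input_l2d_1 input_l2d_2 out) := by unfold Spec_mix_two_list_as_beside; infer_instance

-- ===== CLAIM (what is proved, stated in full; the proofs are below) =====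
def Claim_equal_mix_two_list_as_beside : Prop := ∀ (input_l2d_1 : List (List String)) (input_l2d_2 : List (List String)), Dom_mix_two_list_as_beside input_l2d_1 input_l2d_2 → Pre_mix_two_list_as_beside input_l2d_1 input_l2d_2 → Spec_mix_two_list_as_beside input_l2d_1 input_l2d_2 (mix_two_list_as_beside input_l2d_1 input_l2d_2)

-- ===== LEMMAS AND PROOFS =====

def pvK (r : List String) : String := r.headD ""
def pvT (r : List String) : List String := r.drop 1
def pvCat (k : String) (l2 : List (List String)) : List String :=
  (l2.filter (fun r => pvK r == k)).flatMap pvT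
def pvStepA (e : List String) (d : PySem.Dict String (List String)) (one : List String) :
    PySem.Dict String (List String) :=
  d.insert (pvK one) ((if d.keys.contains (pvK one) then d.getD (pvK one) [] else e) ++ pvT one)

def pvStepB (d : PySem.Dict String (List String)) (row : List String) :
    PySem.Dict String (List String) :=
  d.insert (pvK row) (d.getD (pvK row) [] ++ pvT row)
def pvStepC (checked e2 : List String) (d : PySem.Dict String (List String)) (one : String) :
    PySem.Dict String (List String) :=
  if !(checked.contains one) then d.insert one (d.getD one [] ++ e2) else d
lemma pv_loop2_pair (e : List String) (l2 : List (List String))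
    (d : PySem.Dict String (List String)) (c : List String) :
    l2.foldl (fun st one =>
      (if st.1.keys.contains (one.headD "") then
          st.1.insert (one.headD "") (st.1.getD (one.headD "") [] ++ one.drop 1)
        else
          st.1.insert (one.headD "") (e ++ one.drop 1),
       st.2 ++ [one.headD ""])) (d, c)
    = (l2.foldl (pvStepA e) d, c ++ l2.map pvK) := by
  induction l2 generalizing d c with
  | nil => simp
  | cons r rest ih =>
    simp only [List.foldl_cons, List.map_cons]
    rw [ih]
    have hstep : (if d.keys.contains (r.headD "") = true then
          d.insert (r.headD "") (d.getD (r.headD "") [] ++ List.drop 1 r)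
        else d.insert (r.headD "") (e ++ List.drop 1 r)) = pvStepA e d r := by
      simp only [pvStepA, pvK, pvT]
      rw [apply_ite (fun v => d.insert (r.headD "") (v ++ r.drop 1))]
    rw [hstep, List.append_assoc]
    rfl

lemma pv_cat_cons (k : String) (r : List String) (rest : List (List String)) :
    pvCat k (r :: rest) = (if pvK r = k then pvT r else []) ++ pvCat k rest := by
  by_cases h : pvK r = k <;> simp [pvCat, h]

lemma pv_cat_nil_of_not_mem (k : String) (l2 : List (List String)) (h : k ∉ l2.map pvK) :
    pvCat k l2 = [] := by
  have : l2.filter (fun r => pvK r == k) = [] := by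
    rw [List.filter_eq_nil_iff]
    intro r hr hbeq
    exact h (List.mem_map.mpr ⟨r, hr, by simpa using hbeq⟩)
  simp [pvCat, this]

lemma pv_getD_afold (e : List String) (l2 : List (List String))
    (d : PySem.Dict String (List String)) (k : String) :
    (l2.foldl (pvStepA e) d).getD k []
    = if k ∈ l2.map pvK then (if k ∈ d.keys then d.getD k [] else e) ++ pvCat k l2
      else d.getD k [] := by
  induction l2 generalizing d with
  | nil => simp
  | cons r rest ih =>
    rw [List.foldl_cons, ih, pv_cat_cons]
    have F1 : ∀ k', (pvStepA e d r).getD k' [] =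
        if k' = pvK r then (if pvK r ∈ d.keys then d.getD (pvK r) [] else e) ++ pvT r
        else d.getD k' [] := by
      intro k'
      rw [pvStepA, PySem.Dict.getD_insert]
      by_cases h : pvK r ∈ d.keys <;> simp [h]
    have F2 : ∀ k', k' ∈ (pvStepA e d r).keys ↔ k' = pvK r ∨ k' ∈ d.keys := by
      intro k'; rw [pvStepA]; exact PySem.Dict.mem_keys_insert d _ _ _
    by_cases hk : k = pvK r
    · subst hk
      rw [List.map_cons, if_pos (List.mem_cons_self), if_pos rfl,
          if_pos ((F2 _).mpr (Or.inl rfl)), F1, if_pos rfl]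
      by_cases hm : pvK r ∈ rest.map pvK
      · rw [if_pos hm, List.append_assoc]
      · rw [if_neg hm, pv_cat_nil_of_not_mem _ _ hm, List.append_nil]
    · have e1 : (k ∈ (pvStepA e d r).keys) = (k ∈ d.keys) := propext ((F2 k).trans (or_iff_right hk))
      have e2 : (k ∈ (r :: rest).map pvK) = (k ∈ rest.map pvK) := by
        rw [List.map_cons]; exact propext (List.mem_cons.trans (or_iff_right hk))
      have e3 : (if pvK r = k then pvT r else ([] : List String)) = [] :=
        if_neg (fun h => hk h.symm)
      have e4 : (pvStepA e d r).getD k [] = d.getD k [] := by rw [F1 k, if_neg hk]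
      rw [e3, List.nil_append, e4]
      simp only [e1, e2]

lemma pv_getD_bfold (l2 : List (List String)) (d : PySem.Dict String (List String)) (k : String) :
    (l2.foldl pvStepB d).getD k [] = d.getD k [] ++ pvCat k l2 := by
  induction l2 generalizing d with
  | nil => simp [pvCat]
  | cons r rest ih =>
    rw [List.foldl_cons, ih, pv_cat_cons]
    by_cases hk : k = pvK r
    · subst hk
      rw [pvStepB, PySem.Dict.getD_insert, if_pos rfl, if_pos rfl, List.append_assoc]
    · have e3 : (if pvK r = k then pvT r else ([] : List String)) = [] :=
        if_neg (fun h => hk h.symm)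
      rw [e3, List.nil_append, pvStepB, PySem.Dict.getD_insert, if_neg hk]

lemma pv_getD_default (d : PySem.Dict String (List String)) (k : String)
    (h : k ∈ d.keys) (a b : List String) : d.getD k a = d.getD k b := by
  have hc : d.contains k = true := (PySem.Dict.contains_iff_mem_keys d k).mpr h
  rw [PySem.Dict.contains_eq_isSome_get?] at hc
  obtain ⟨v, hv⟩ := Option.isSome_iff_exists.mp hc
  rw [PySem.Dict.getD_eq_get?_getD, PySem.Dict.getD_eq_get?_getD, hv]
  rfl

lemma pv_update_eq (xs s : List String) :
    PySem.Set.update s xs = s ++ (PySem.Set.update [] xs).filter (fun x => !(s.contains x)) := by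
  induction xs generalizing s with
  | nil => simp [PySem.Set.update]
  | cons x xs ih =>
    have hx : ∀ t : List String, PySem.Set.update t (x :: xs) = PySem.Set.update (PySem.Set.add t x) xs := by
      intro t; simp [PySem.Set.update]
    have hadd0 : PySem.Set.add ([] : List String) x = [x] := by
      simp [PySem.Set.add_of_not_mem]
    rw [hx s, ih, hx [], hadd0, ih [x]]
    by_cases h : x ∈ s
    · rw [PySem.Set.add_of_mem h]
      congr 1
      rw [List.filter_append]
      have h1 : ([x].filter (fun y => !(s.contains y))) = [] := by simp [h]
      rw [h1, List.nil_append, List.filter_filter]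
      apply List.filter_congr
      intro y _
      by_cases hyx : y = x
      · subst hyx; simp [h]
      · simp [hyx]
    · rw [PySem.Set.add_of_not_mem h, List.append_assoc]
      congr 1
      rw [List.filter_append]
      have h1 : ([x].filter (fun y => !(s.contains y))) = [x] := by simp [h]
      rw [h1, List.filter_filter]
      congr 1
      apply List.filter_congr
      intro y _
      by_cases hyx : y = x
      · subst hyx; simp [h]
      · simp [hyx]

lemma pv_stepC_of_checked (checked e2 : List String) (d : PySem.Dict String (List String))
    (k0 : String) (hc : checked.contains k0 = true) : pvStepC checked e2 d k0 = d := by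
  rw [pvStepC, hc]; rfl

lemma pv_stepC_of_not_checked (checked e2 : List String) (d : PySem.Dict String (List String))
    (k0 : String) (hc : checked.contains k0 = false) :
    pvStepC checked e2 d k0 = d.insert k0 (d.getD k0 [] ++ e2) := by
  rw [pvStepC, hc]; rfl

lemma pv_keys_loop3 (checked e2 : List String) (ks : List String)
    (d : PySem.Dict String (List String)) (h : ∀ k ∈ ks, k ∈ d.keys) :
    (ks.foldl (pvStepC checked e2) d).keys = d.keys := by
  induction ks generalizing d with
  | nil => rfl
  | cons k0 ks ih =>
    rw [List.foldl_cons]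
    have hk0 : k0 ∈ d.keys := h k0 (List.mem_cons_self)
    have hkeys : (pvStepC checked e2 d k0).keys = d.keys := by
      by_cases hc : checked.contains k0 = true
      · rw [pv_stepC_of_checked _ _ _ _ hc]
      · rw [Bool.not_eq_true] at hc
        rw [pv_stepC_of_not_checked _ _ _ _ hc]
        exact PySem.Dict.keys_insert_of_contains d _ ((PySem.Dict.contains_iff_mem_keys d k0).mpr hk0)
    rw [ih _ (fun k hk => hkeys ▸ h k (List.mem_cons_of_mem _ hk)), hkeys]

lemma pv_getD_loop3 (checked e2 : List String) (ks : List String)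
    (d : PySem.Dict String (List String)) (hnd : ks.Nodup) (k : String) :
    (ks.foldl (pvStepC checked e2) d).getD k []
    = if k ∈ ks ∧ checked.contains k = false then d.getD k [] ++ e2 else d.getD k [] := by
  induction ks generalizing d with
  | nil => simp
  | cons k0 ks ih =>
    obtain ⟨hk0ks, hnd'⟩ := List.nodup_cons.mp hnd
    rw [List.foldl_cons, ih _ hnd']
    by_cases hk : k = k0
    · subst hk
      rw [if_neg (fun hc => hk0ks hc.1)]
      by_cases hc : checked.contains k = true
      · rw [pv_stepC_of_checked _ _ _ _ hc,
            if_neg (fun hx : _ ∈ _ ∧ checked.contains k = false => Bool.false_ne_true (hx.2 ▸ hc))]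
      · rw [Bool.not_eq_true] at hc
        rw [pv_stepC_of_not_checked _ _ _ _ hc, PySem.Dict.getD_insert, if_pos rfl,
            if_pos ⟨List.mem_cons_self, hc⟩]
    · have hstep : (pvStepC checked e2 d k0).getD k [] = d.getD k [] := by
        by_cases hc : checked.contains k0 = true
        · rw [pv_stepC_of_checked _ _ _ _ hc]
        · rw [Bool.not_eq_true] at hc
          rw [pv_stepC_of_not_checked _ _ _ _ hc, PySem.Dict.getD_insert, if_neg hk]
      rw [hstep]
      have e2' : (k ∈ k0 :: ks) = (k ∈ ks) := propext (List.mem_cons.trans (or_iff_right hk))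
      simp only [e2']

lemma pv_ports_eq (l1 l2 : List (List String)) :
    mix_two_list_as_beside l1 l2 = mix_two_list_as_beside_alt l1 l2 := by
  simp only [mix_two_list_as_beside, mix_two_list_as_beside_alt]
  rw [pv_loop2_pair]
  rw [PySem.List.foldl_append_singleton_eq_map (fun p : String × List String => p.1 :: p.2)]
  dsimp only
  rw [List.nil_append, List.nil_append]
  set e1 := List.replicate ((l1.headD []).length - 1) "" with he1
  set e2 := List.replicate ((l2.headD []).length - 1) "" with he2
  set d1 := List.foldl (fun (d : PySem.Dict String (List String)) one => d.insert (one.headD "") (List.drop 1 one)) PySem.Dict.empty l1 with hd1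
  set d2 := List.foldl (fun (d : PySem.Dict String (List String)) row => d.insert (row.headD "") (d.getD (row.headD "") [] ++ List.drop 1 row)) PySem.Dict.empty l2 with hd2
  set dic2 := List.foldl (pvStepA e1) d1 l2 with hdic2
  show List.map (fun p : String × List String => p.1 :: p.2)
      (List.foldl (pvStepC (List.map pvK l2) e2) dic2 dic2.keys).items = _
  have hstepA : pvStepA e1 = fun (d : PySem.Dict String (List String)) x =>
      d.insert (pvK x) ((fun (d : PySem.Dict String (List String)) x =>
        (if d.keys.contains (pvK x) then d.getD (pvK x) [] else e1) ++ pvT x) d x) := rfl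
  have hstepB : (fun (d : PySem.Dict String (List String)) row =>
      d.insert (row.headD "") (d.getD (row.headD "") [] ++ List.drop 1 row))
      = fun (d : PySem.Dict String (List String)) x =>
        d.insert (pvK x) ((fun (d : PySem.Dict String (List String)) x =>
          d.getD (pvK x) [] ++ pvT x) d x) := rfl
  have hnd1 : d1.keys.Nodup := by
    rw [hd1]
    exact PySem.Dict.nodup_keys_foldl_insert_key l1 (fun one => one.headD "") _ _
      (by rw [PySem.Dict.keys_empty]; exact List.nodup_nil)
  have hkdic2 : dic2.keys = PySem.Set.update d1.keys (List.map pvK l2) := by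
    rw [hdic2, hstepA, PySem.Dict.keys_foldl_insert_key]
  have hnddic2 : dic2.keys.Nodup := by
    rw [hdic2, hstepA]
    exact PySem.Dict.nodup_keys_foldl_insert_key l2 pvK _ _ hnd1
  have hkd2 : d2.keys = PySem.Set.update ([] : List String) (List.map pvK l2) := by
    rw [hd2, hstepB, PySem.Dict.keys_foldl_insert_key, PySem.Dict.keys_empty]
  have hcontains : ∀ k, d1.contains k = d1.keys.contains k := by
    intro k
    rw [Bool.eq_iff_iff]
    exact (PySem.Dict.contains_iff_mem_keys d1 k).trans List.contains_iff_mem.symm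
  have hkeys : dic2.keys = d1.keys ++ List.filter (fun k => !(d1.contains k)) d2.keys := by
    rw [hkdic2, pv_update_eq, hkd2]
    congr 1
    apply List.filter_congr
    intro k _
    rw [hcontains k]
  have hkeys3 : (List.foldl (pvStepC (List.map pvK l2) e2) dic2 dic2.keys).keys = dic2.keys :=
    pv_keys_loop3 _ _ _ _ (fun k hk => hk)
  rw [PySem.Dict.items_eq_map_keys _ (by rw [hkeys3]; exact hnddic2) ([] : List String),
      hkeys3, List.map_map, ← hkeys]
  apply List.map_congr_left
  intro k hk
  simp only [Function.comp]
  congr 1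
  rw [pv_getD_loop3 _ _ _ _ hnddic2 k]
  have hge : dic2.getD k [] = if k ∈ List.map pvK l2 then
      (if k ∈ d1.keys then d1.getD k [] else e1) ++ pvCat k l2 else d1.getD k [] := by
    rw [hdic2, pv_getD_afold]
  have hd2get : ∀ k', d2.getD k' [] = pvCat k' l2 := by
    intro k'
    have hb : d2 = List.foldl pvStepB PySem.Dict.empty l2 := rfl
    rw [hb, pv_getD_bfold, PySem.Dict.getD_empty, List.nil_append]
  by_cases hm : k ∈ List.map pvK l2
  · have hcm : (List.map pvK l2).contains k = true := List.contains_iff_mem.mpr hm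
    rw [if_neg (fun hx => by rw [hcm] at hx; exact absurd hx.2 (by decide)), hge, if_pos hm]
    have hkd2m : k ∈ d2.keys := by
      rw [hkd2]
      exact (PySem.Set.mem_update _ _ _).mpr (Or.inr hm)
    rw [pv_getD_default d2 k hkd2m e2 [], hd2get]
    by_cases h1 : k ∈ d1.keys
    · rw [if_pos h1, pv_getD_default d1 k h1 e1 []]
    · have h1c : d1.contains k = false := by
        rw [← Bool.not_eq_true]
        intro hx
        exact h1 ((PySem.Dict.contains_iff_mem_keys d1 k).mp hx)
      rw [if_neg h1, PySem.Dict.getD_of_not_contains _ _ h1c]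
  · have hcm : (List.map pvK l2).contains k = false := by
      rw [← Bool.not_eq_true]
      intro hx
      exact hm (List.contains_iff_mem.mp hx)
    have h1 : k ∈ d1.keys := by
      rw [hkdic2] at hk
      rcases (PySem.Set.mem_update _ _ _).mp hk with h | h
      · exact h
      · exact absurd h hm
    have h2c : d2.contains k = false := by
      rw [← Bool.not_eq_true]
      intro hx
      have := (PySem.Dict.contains_iff_mem_keys d2 k).mp hx
      rw [hkd2] at this
      rcases (PySem.Set.mem_update _ _ _).mp this with h | h
      · exact absurd h (List.not_mem_nil)
      · exact hm h
    rw [if_pos ⟨hk, hcm⟩, hge, if_neg hm, pv_getD_default d1 k h1 e1 [],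
        PySem.Dict.getD_of_not_contains _ _ h2c]

-- ===== VERDICT (by name: the statement is the Claim_ definition above) =====
theorem mix_two_list_as_beside_spec : Claim_equal_mix_two_list_as_beside := by
  intro l1 l2 _ _
  exact pv_ports_eq l1 l2
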